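-- pv_equiv track=rewrite | github.com/atticuskramer/advent-of-code | 2015/aoc_day_3.py | deliver_presents
-- ===== SOURCE A (Python) =====
-- def deliver_presents(directions, num_deliverers):
--     """Get the set of homes visited based on 'directions'
--
--     directions is a string of characters in [^, v, <, >]
--     Returns a dictionary with keys of the locations visited
--     and values of the number of times the location was visited"""
--     visited = {(0,0): 1}
--     locations = [[0,0] for _ in range(num_deliverers)]
--     cur_deliverer = 0
--     for direction in directions:
--         if direction == '>':
--             locations[cur_deliverer][0] += 1
--         elif direction == 'v':
--             locations[cur_deliverer][1] += 1
--         elif direction == '<':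
--             locations[cur_deliverer][0] -= 1
--         elif direction == '^':
--             locations[cur_deliverer][1] -= 1
--         loc_tuple = tuple(locations[cur_deliverer])
--         if loc_tuple in visited:
--             visited[loc_tuple] += 1
--         else:
--             visited[loc_tuple] = 1
--         cur_deliverer = (cur_deliverer + 1) % num_deliverers
--     return visited
-- ===== SOURCE B (Python) =====
-- def deliver_presents(directions, num_deliverers):
--     """Get the set of homes visited based on 'directions'"""
--     deltas = {'>': (1, 0), 'v': (0, 1), '<': (-1, 0), '^': (0, -1)}
--     n = len(directions)
--     pos = [(0, 0)] * n
--     for start in range(min(num_deliverers, n)):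
--         x, y = 0, 0
--         for i in range(start, n, num_deliverers):
--             dx, dy = deltas.get(directions[i], (0, 0))
--             x += dx
--             y += dy
--             pos[i] = (x, y)
--     visited = {(0, 0): 1}
--     for p in pos:
--         visited[p] = visited.get(p, 0) + 1
--     return visited
-- ===== Notes on version B (the rewrite author's own statement) =====
-- stated objective: alternative
-- what changed: Instead of one interleaved pass rotating through a mutable per-deliverer location table, B walks each deliverer's slice of the directions independently (indices start, start+d, ...) to fill a position-per-step array, then counts visits in a single second pass; Pre_ excludes num_deliverers <= 0 with nonempty directions, where A raises IndexError.
import Mathlib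
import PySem

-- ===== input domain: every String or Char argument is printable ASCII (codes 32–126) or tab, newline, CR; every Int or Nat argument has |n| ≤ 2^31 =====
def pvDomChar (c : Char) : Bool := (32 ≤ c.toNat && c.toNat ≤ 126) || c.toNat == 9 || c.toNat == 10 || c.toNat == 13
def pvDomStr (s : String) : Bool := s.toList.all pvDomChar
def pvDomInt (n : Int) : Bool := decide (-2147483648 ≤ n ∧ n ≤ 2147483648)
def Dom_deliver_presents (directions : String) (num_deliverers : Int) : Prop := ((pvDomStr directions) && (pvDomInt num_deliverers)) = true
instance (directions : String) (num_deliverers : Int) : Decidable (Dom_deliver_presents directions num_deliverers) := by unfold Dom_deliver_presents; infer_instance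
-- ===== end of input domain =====

-- B re-implements the round-robin delivery walk as independent per-deliverer slice walks followed by
-- a single counting pass (objective: alternative decomposition, same exact dict of visit counts).

-- ===== PORT A =====
-- loop body of A's single for-loop, lambda-lifted; state = (visited, locations, cur_deliverer)
def aStep (num_deliverers : Int)
    (st : PySem.Dict (Int × Int) Int × List (Int × Int) × Int) (c : Char) :
    PySem.Dict (Int × Int) Int × List (Int × Int) × Int :=
  match PySem.List.pyGet? st.2.1 st.2.2 with
  | none => st  -- Python raises IndexError here (only when num_deliverers ≤ 0); excluded by Pre_
  | some (x, y) =>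
    let loc := if c = '>' then (x + 1, y)
               else if c = 'v' then (x, y + 1)
               else if c = '<' then (x - 1, y)
               else if c = '^' then (x, y - 1)
               else (x, y)
    let locations := PySem.List.pySetD st.2.1 st.2.2 loc
    let visited := if (st.1.get? loc).isSome then st.1.insert loc (st.1.getD loc 0 + 1)
                   else st.1.insert loc 1
    (visited, locations, PySem.Int.mod (st.2.2 + 1) num_deliverers)

def deliver_presents (directions : String) (num_deliverers : Int) : List (Int × Int × Int) :=
  let visited : PySem.Dict (Int × Int) Int := PySem.Dict.empty.insert (0, 0) 1
  let locations : List (Int × Int) := List.replicate num_deliverers.toNat (0, 0)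
  let final := directions.toList.foldl (aStep num_deliverers) (visited, locations, 0)
  final.1.items.map (fun e => (e.1.1, e.1.2, e.2))

-- ===== PORT B =====
def bDeltas : PySem.Dict Char (Int × Int) :=
  PySem.Dict.ofList [('>', (1, 0)), ('v', (0, 1)), ('<', (-1, 0)), ('^', (0, -1))]

-- body of B's inner loop over range(start, n, num_deliverers); state = ((x, y), pos)
def bInnerStep (cs : List Char) (st : (Int × Int) × List (Int × Int)) (i : Int) :
    (Int × Int) × List (Int × Int) :=
  let d := bDeltas.getD (PySem.List.pyGetD cs i ' ') (0, 0)
  let x := st.1.1 + d.1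
  let y := st.1.2 + d.2
  ((x, y), PySem.List.pySetD st.2 i (x, y))

-- body of B's outer loop over range(min(num_deliverers, n)): one whole slice walk
def bOuterStep (num_deliverers : Int) (cs : List Char) (pos : List (Int × Int)) (start : Int) :
    List (Int × Int) :=
  ((PySem.List.pyRange start (cs.length : Int) num_deliverers).foldl (bInnerStep cs)
    ((0, 0), pos)).2

def deliver_presents_alt (directions : String) (num_deliverers : Int) : List (Int × Int × Int) :=
  let cs := directions.toList
  let pos := (PySem.List.pyRange 0 (min num_deliverers (cs.length : Int)) 1).foldl
    (bOuterStep num_deliverers cs) (List.replicate cs.length (0, 0))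
  let visited := pos.foldl (fun (v : PySem.Dict (Int × Int) Int) p => v.insert p (v.getD p 0 + 1))
    (PySem.Dict.empty.insert (0, 0) 1)
  visited.items.map (fun e => (e.1.1, e.1.2, e.2))

-- ===== PRECONDITION & SPEC =====
-- Pre_ excludes exactly the inputs where A raises IndexError: num_deliverers ≤ 0 with nonempty
-- directions (A returns normally everywhere else).
def Pre_deliver_presents (directions : String) (num_deliverers : Int) : Prop :=
  directions.toList = [] ∨ 1 ≤ num_deliverers
instance (directions : String) (num_deliverers : Int) : Decidable (Pre_deliver_presents directions num_deliverers) := by unfold Pre_deliver_presents; infer_instance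

def pvWitness_deliver_presents : String × Int := (">>v<^x", 2)

def Spec_deliver_presents (directions : String) (num_deliverers : Int) (out : List (Int × Int × Int)) : Prop := out = deliver_presents_alt directions num_deliverers
instance (directions : String) (num_deliverers : Int) (out : List (Int × Int × Int)) : Decidable (Spec_deliver_presents directions num_deliverers out) := by unfold Spec_deliver_presents; infer_instance

-- ===== CLAIM (what is proved, stated in full; the proofs are below) =====
def Claim_equal_deliver_presents : Prop := ∀ (directions : String) (num_deliverers : Int), Dom_deliver_presents directions num_deliverers → Pre_deliver_presents directions num_deliverers → Spec_deliver_presents directions num_deliverers (deliver_presents directions num_deliverers)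

-- ===== LEMMAS AND PROOFS =====

-- the displacement one direction character causes
def pdelta (c : Char) : Int × Int :=
  if c = '>' then (1, 0) else if c = 'v' then (0, 1)
  else if c = '<' then (-1, 0) else if c = '^' then (0, -1) else (0, 0)

-- the sequence of positions A records, one per direction character
def visitList : List (Int × Int) → Nat → List Char → List (Int × Int)
  | _, _, [] => []
  | locs, cur, c :: cs =>
    let p := locs.getD cur (0, 0) + pdelta c
    p :: visitList (locs.set cur p) ((cur + 1) % locs.length) cs

-- the common counting fold
def countFold (v : PySem.Dict (Int × Int) Int) (ps : List (Int × Int)) : PySem.Dict (Int × Int) Int :=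
  ps.foldl (fun v p => v.insert p (v.getD p 0 + 1)) v

-- arithmetic progression of indices s, s+m, …, s+m*(c-1)
def progL (s m c : Nat) : List Nat := (List.range c).map (fun j => s + m * j)

def progSum (cs : List Char) (s m c : Nat) : Int × Int :=
  ((progL s m c).map (fun j => pdelta (cs.getD j ' '))).sum

-- displacement of the deliverer serving step i, after its move at step i
def specPos (cs : List Char) (m k : Nat) : Int × Int := progSum cs (k % m) m (k / m + 1)

-- class-filtered displacement sum (A-side induction invariant form)
def specC (cs : List Char) (m cur i : Nat) : Int × Int :=
  (((List.range (i + 1)).filter (fun j => (cur + j) % m = (cur + i) % m)).map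
    (fun j => pdelta (cs.getD j ' '))).sum

lemma stepA_eq (x y : Int) (c : Char) :
    (if c = '>' then (x + 1, y)
     else if c = 'v' then (x, y + 1)
     else if c = '<' then (x - 1, y)
     else if c = '^' then (x, y - 1)
     else (x, y)) = (x, y) + pdelta c := by
  unfold pdelta
  split_ifs <;> simp [Prod.ext_iff] <;> ring

lemma bDelta_eq (c : Char) : bDeltas.getD c (0, 0) = pdelta c := by
  have hit : bDeltas.items = [('>', ((1:Int), (0:Int))), ('v', (0, 1)), ('<', (-1, 0)), ('^', (0, -1))] := rfl
  by_cases h1 : c = '>'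
  · subst h1; rfl
  by_cases h2 : c = 'v'
  · subst h2; rfl
  by_cases h3 : c = '<'
  · subst h3; rfl
  by_cases h4 : c = '^'
  · subst h4; rfl
  have g1 : (('>' : Char) == c) = false := beq_eq_false_iff_ne.mpr (fun h => h1 h.symm)
  have g2 : (('v' : Char) == c) = false := beq_eq_false_iff_ne.mpr (fun h => h2 h.symm)
  have g3 : (('<' : Char) == c) = false := beq_eq_false_iff_ne.mpr (fun h => h3 h.symm)
  have g4 : (('^' : Char) == c) = false := beq_eq_false_iff_ne.mpr (fun h => h4 h.symm)
  simp [PySem.Dict.getD, PySem.Dict.get?, hit, List.find?, g1, g2, g3, g4, pdelta, h1, h2, h3, h4]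

lemma countStep_eq (v : PySem.Dict (Int × Int) Int) (p : Int × Int) :
    (if (v.get? p).isSome then v.insert p (v.getD p 0 + 1) else v.insert p 1)
      = v.insert p (v.getD p 0 + 1) := by
  cases h : v.get? p <;> simp [h, PySem.Dict.getD]

lemma pySetD_natCast {α : Type} (xs : List α) (n : Nat) (v : α) :
    PySem.List.pySetD xs (n : Int) v = xs.set n v := by
  simp only [PySem.List.pySetD, PySem.List.pySet?, PySem.List.pyIdx?]
  by_cases h : n < xs.length
  · have h' : (n : Int) < (xs.length : Int) := by exact_mod_cast h
    simp [h']
  · have h' : ¬ (n : Int) < (xs.length : Int) := by exact_mod_cast h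
    simp [h']
    exact (List.set_eq_of_length_le (by omega)).symm

lemma getD_set_ne {α : Type} (xs : List α) (s k : Nat) (v d : α) (h : k ≠ s) :
    (xs.set s v).getD k d = xs.getD k d := by
  by_cases hk : k < xs.length
  · rw [List.getD_eq_getElem _ _ (by simpa using hk), List.getD_eq_getElem _ _ hk]
    exact List.getElem_set_ne (Ne.symm h) _
  · rw [List.getD_eq_default _ _ (by simpa using not_lt.mp hk),
        List.getD_eq_default _ _ (not_lt.mp hk)]

lemma length_visitList (cs : List Char) :
    ∀ locs cur, (visitList locs cur cs).length = cs.length := by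
  induction cs with
  | nil => intro locs cur; rfl
  | cons c cs ih => intro locs cur; simp [visitList, ih]

lemma foldA_eq (cs : List Char) :
    ∀ (v : PySem.Dict (Int × Int) Int) (locs : List (Int × Int)) (cur : Nat) (nd : Int),
      0 < locs.length → cur < locs.length → nd = (locs.length : Int) →
      (cs.foldl (aStep nd) (v, locs, (cur : Int))).1 = countFold v (visitList locs cur cs) := by
  induction cs with
  | nil => intro v locs cur nd hm hcur hnd; simp [visitList, countFold]
  | cons c cs ih =>
    intro v locs cur nd hm hcur hnd
    rcases hp : locs[cur] with ⟨x, y⟩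
    have hget : PySem.List.pyGet? locs (cur : Int) = some (x, y) := by
      rw [PySem.List.pyGet?_natCast, List.getElem?_eq_getElem hcur, hp]
    have hmod : PySem.Int.mod ((cur : Int) + 1) nd = (((cur + 1) % locs.length : Nat) : Int) := by
      rw [hnd]
      have : ((cur : Int) + 1) = (((cur + 1 : Nat)) : Int) := by push_cast; ring
      rw [this, PySem.Int.mod_natCast]
    have hstep : aStep nd (v, locs, (cur : Int)) c
        = (v.insert ((x, y) + pdelta c) (v.getD ((x, y) + pdelta c) 0 + 1),
           locs.set cur ((x, y) + pdelta c),
           (((cur + 1) % locs.length : Nat) : Int)) := by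
      simp only [aStep, hget, stepA_eq, countStep_eq, pySetD_natCast, hmod]
    have hgd : locs[cur]?.getD ((0 : Int), (0 : Int)) = (x, y) := by
      rw [List.getElem?_eq_getElem hcur, hp]
      rfl
    rw [List.foldl_cons, hstep,
        ih _ _ _ nd (by simpa using hm) (by simpa using Nat.mod_lt (cur + 1) hm)
          (by simpa using hnd)]
    simp [visitList, countFold, hgd]

lemma pyRange_pos_nil {a b s : Int} (hs : 0 < s) (h : b ≤ a) : PySem.List.pyRange a b s = [] := by
  rw [PySem.List.pyRange_of_pos a b hs, if_neg (by omega)]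
  rfl

lemma pyRange_pos_cons {a b s : Int} (hs : 0 < s) (h : a < b) :
    PySem.List.pyRange a b s = a :: PySem.List.pyRange (a + s) b s := by
  rw [PySem.List.pyRange_of_pos a b hs, PySem.List.pyRange_of_pos (a + s) b hs]
  have hcnt : (if a < b then ((b - a + s - 1) / s).toNat else 0)
      = (if a + s < b then ((b - (a + s) + s - 1) / s).toNat else 0) + 1 := by
    rw [if_pos h]
    by_cases h2 : a + s < b
    · rw [if_pos h2]
      have he : b - a + s - 1 = (b - (a + s) + s - 1) + 1 * s := by ring
      rw [he, Int.add_mul_ediv_right _ _ hs.ne']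
      have : 0 ≤ (b - (a + s) + s - 1) / s := Int.ediv_nonneg (by omega) hs.le
      omega
    · rw [if_neg h2]
      have h1' : 1 ≤ (b - a + s - 1) / s := (Int.le_ediv_iff_mul_le hs).mpr (by omega)
      have h2' : (b - a + s - 1) / s < 2 := (Int.ediv_lt_iff_lt_mul hs).mpr (by omega)
      omega
  rw [hcnt, List.range_succ_eq_map, List.map_cons, List.map_map]
  congr 1
  · simp
  · exact List.map_congr_left (fun k _ => by
      simp only [Function.comp, Nat.succ_eq_add_one]
      push_cast
      ring)

lemma inner_nil (cs : List Char) (m L : Nat) (s : Nat) (hm : 0 < m) (h : L ≤ s)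
    (st : (Int × Int) × List (Int × Int)) :
    (PySem.List.pyRange (s : Int) (L : Int) (m : Int)).foldl (bInnerStep cs) st = st := by
  rw [pyRange_pos_nil (by exact_mod_cast hm) (by exact_mod_cast h)]
  rfl

lemma inner_step_eq (cs : List Char) (s : Nat) (acc : Int × Int) (pos : List (Int × Int)) :
    bInnerStep cs (acc, pos) (s : Int)
      = (acc + pdelta (cs.getD s ' '), pos.set s (acc + pdelta (cs.getD s ' '))) := by
  rcases acc with ⟨ax, ay⟩
  simp only [bInnerStep, PySem.List.pyGetD_natCast, bDelta_eq, pySetD_natCast]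
  rfl

lemma inner_miss (cs : List Char) (m L : Nat) (hm : 0 < m) :
    ∀ (n s : Nat) (acc : Int × Int) (pos : List (Int × Int)) (k : Nat), L - s = n →
      (∀ j : Nat, k ≠ s + m * j) →
      (((PySem.List.pyRange (s : Int) (L : Int) (m : Int)).foldl (bInnerStep cs) (acc, pos)).2).getD k (0, 0)
        = pos.getD k (0, 0) := by
  intro n
  induction n using Nat.strong_induction_on with
  | _ n ih =>
    intro s acc pos k hn hk
    by_cases hsl : s < L
    · rw [pyRange_pos_cons (by exact_mod_cast hm) (by exact_mod_cast hsl), List.foldl_cons,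
          inner_step_eq]
      have hcast : (s : Int) + (m : Int) = ((s + m : Nat) : Int) := by push_cast; ring
      rw [hcast, ih (L - (s + m)) (by omega) (s + m) _ _ k rfl
        (fun j => by
          have h1 := hk (j + 1)
          have h2 : m * (j + 1) = m * j + m := by ring
          omega)]
      exact getD_set_ne _ _ _ _ _ (by have := hk 0; omega)
    · rw [inner_nil cs m L s hm (by omega)]

lemma inner_len (cs : List Char) (m L : Nat) (hm : 0 < m) :
    ∀ (n s : Nat) (acc : Int × Int) (pos : List (Int × Int)), L - s = n →
      (((PySem.List.pyRange (s : Int) (L : Int) (m : Int)).foldl (bInnerStep cs) (acc, pos)).2).length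
        = pos.length := by
  intro n
  induction n using Nat.strong_induction_on with
  | _ n ih =>
    intro s acc pos hn
    by_cases hsl : s < L
    · rw [pyRange_pos_cons (by exact_mod_cast hm) (by exact_mod_cast hsl), List.foldl_cons,
          inner_step_eq]
      have hcast : (s : Int) + (m : Int) = ((s + m : Nat) : Int) := by push_cast; ring
      rw [hcast, ih (L - (s + m)) (by omega) (s + m) _ _ rfl, List.length_set]
    · rw [inner_nil cs m L s hm (by omega)]

lemma progL_cons (s m j : Nat) : progL s m (j + 1) = s :: progL (s + m) m j := by
  unfold progL
  rw [List.range_succ_eq_map, List.map_cons, List.map_map]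
  congr 1
  apply List.map_congr_left
  intro a _
  simp only [Function.comp, Nat.succ_eq_add_one]
  ring

lemma progSum_cons (cs : List Char) (s m j : Nat) :
    progSum cs s m (j + 1) = pdelta (cs.getD s ' ') + progSum cs (s + m) m j := by
  unfold progSum
  rw [progL_cons, List.map_cons, List.sum_cons]

lemma inner_hit (cs : List Char) (m L : Nat) (hm : 0 < m) :
    ∀ (n s : Nat) (acc : Int × Int) (pos : List (Int × Int)) (j : Nat), L - s = n →
      s + m * j < L → pos.length = L →
      (((PySem.List.pyRange (s : Int) (L : Int) (m : Int)).foldl (bInnerStep cs) (acc, pos)).2).getD (s + m * j) (0, 0)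
        = acc + progSum cs s m (j + 1) := by
  intro n
  induction n using Nat.strong_induction_on with
  | _ n ih =>
    intro s acc pos j hn hjL hlen
    have hsl : s < L := by
      have h2 : 0 ≤ m * j := Nat.zero_le _
      omega
    rw [pyRange_pos_cons (by exact_mod_cast hm) (by exact_mod_cast hsl), List.foldl_cons,
        inner_step_eq]
    have hcast : (s : Int) + (m : Int) = ((s + m : Nat) : Int) := by push_cast; ring
    rw [hcast]
    cases j with
    | zero =>
      rw [inner_miss cs m L hm (L - (s + m)) (s + m) _ _ _ rfl (fun j => by
        have h2 : 0 ≤ m * j := Nat.zero_le _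
        omega)]
      have hs : s + m * 0 = s := by omega
      rw [hs, List.getD_eq_getElem _ _ (by rw [List.length_set, hlen]; exact hsl),
          List.getElem_set_self]
      rw [progSum_cons]
      have h0 : progSum cs (s + m) m 0 = 0 := by simp [progSum, progL]
      rw [h0, add_zero]
    | succ j =>
      have hidx : s + m * (j + 1) = (s + m) + m * j := by ring
      rw [hidx, ih (L - (s + m)) (by omega) (s + m) _ _ j rfl (by omega)
        (by rw [List.length_set, hlen])]
      rw [progSum_cons cs s m (j + 1), ← add_assoc]

lemma outer_spec (cs : List Char) (m : Nat) (hm : 0 < m) :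
    ∀ (t : Nat), t ≤ min m cs.length →
      (((List.range t).map (fun k => ((k : Nat) : Int))).foldl
          (bOuterStep (m : Int) cs) (List.replicate cs.length ((0 : Int), (0 : Int)))).length = cs.length ∧
      ∀ k : Nat, k < cs.length →
        (((List.range t).map (fun k => ((k : Nat) : Int))).foldl
            (bOuterStep (m : Int) cs) (List.replicate cs.length ((0 : Int), (0 : Int)))).getD k (0, 0)
          = if k % m < t then specPos cs m k else (0, 0) := by
  intro t
  induction t with
  | zero =>
    intro _
    refine ⟨by simp, ?_⟩
    intro k hk
    simp only [List.range_zero, List.map_nil, List.foldl_nil]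
    rw [if_neg (by omega), List.getD_eq_getElem _ _ (by simpa using hk), List.getElem_replicate]
  | succ t ih =>
    intro ht
    obtain ⟨ihlen, ihget⟩ := ih (by omega)
    rw [List.range_succ, List.map_append, List.foldl_append]
    set O := ((List.range t).map (fun k => ((k : Nat) : Int))).foldl
      (bOuterStep (m : Int) cs) (List.replicate cs.length ((0 : Int), (0 : Int))) with hO
    simp only [List.map_cons, List.map_nil, List.foldl_cons, List.foldl_nil]
    have hlen2 : (bOuterStep (m : Int) cs O (t : Int)).length = cs.length := by
      rw [bOuterStep, inner_len cs m cs.length hm (cs.length - t) t _ _ rfl, ihlen]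
    refine ⟨hlen2, ?_⟩
    intro k hk
    have htm : t < m := by omega
    by_cases hkt : k % m = t
    · have hj : k = t + m * (k / m) := by
        conv_lhs => rw [← Nat.div_add_mod k m]
        rw [hkt, Nat.add_comm]
      rw [if_pos (by omega)]
      rw [bOuterStep]
      conv_lhs => rw [hj]
      rw [inner_hit cs m cs.length hm (cs.length - t) t _ _ (k / m) rfl (by omega) ihlen]
      rw [show ((0 : Int), (0 : Int)) = (0 : Int × Int) from rfl, zero_add, specPos, hkt]
    · have hmiss : ∀ j : Nat, k ≠ t + m * j := by
        intro j he
        apply hkt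
        rw [he, Nat.add_mul_mod_self_left, Nat.mod_eq_of_lt htm]
      rw [bOuterStep, inner_miss cs m cs.length hm (cs.length - t) t _ _ k rfl hmiss,
          ihget k hk]
      by_cases h2 : k % m < t
      · rw [if_pos h2, if_pos (by omega)]
      · rw [if_neg h2, if_neg (by omega)]

lemma specC_zero (cs : List Char) (c : Char) (m cur : Nat) :
    specC (c :: cs) m cur 0 = pdelta c := by
  simp [specC, List.range_succ]

lemma map_pdelta_succ (c : Char) (cs : List Char) (F : List Nat) :
    List.map (fun j => pdelta ((c :: cs).getD j ' ')) (List.map Nat.succ F)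
      = List.map (fun j => pdelta (cs.getD j ' ')) F := by
  rw [List.map_map]
  exact List.map_congr_left (fun j _ => by
    simp only [Function.comp, Nat.succ_eq_add_one, List.getD_cons_succ])

lemma specC_shift (cs : List Char) (c : Char) (m cur i : Nat) :
    specC (c :: cs) m cur (i + 1)
      = (if cur % m = (cur + (i + 1)) % m then pdelta c else 0) + specC cs m (cur + 1) i := by
  unfold specC
  rw [List.range_succ_eq_map, List.filter_cons, List.filter_map]
  have hf : List.filter ((fun j => decide ((cur + j) % m = (cur + (i + 1)) % m)) ∘ Nat.succ)
        (List.range (i + 1))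
      = List.filter (fun j => decide ((cur + 1 + j) % m = (cur + 1 + i) % m))
        (List.range (i + 1)) := by
    apply List.filter_congr
    intro j _
    simp only [Function.comp]
    have e1 : cur + Nat.succ j = cur + 1 + j := by omega
    have e2 : cur + (i + 1) = cur + 1 + i := by omega
    rw [e1, e2]
  rw [hf]
  by_cases hc : cur % m = (cur + (i + 1)) % m
  · have hc0 : (cur + 0) % m = (cur + (i + 1)) % m := by
      rw [Nat.add_zero]; exact hc
    rw [if_pos (by simpa using hc0), if_pos hc]
    rw [List.map_cons, List.sum_cons, map_pdelta_succ]
    simp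
  · have hc0 : ¬ (cur + 0) % m = (cur + (i + 1)) % m := by
      rw [Nat.add_zero]; exact hc
    rw [if_neg (by simpa using hc0), if_neg hc, zero_add, map_pdelta_succ]

lemma visit_getD (cs : List Char) :
    ∀ (locs : List (Int × Int)) (cur i : Nat), 0 < locs.length → cur < locs.length → i < cs.length →
      (visitList locs cur cs).getD i (0, 0)
        = locs.getD ((cur + i) % locs.length) (0, 0) + specC cs locs.length cur i := by
  induction cs with
  | nil => intro locs cur i hm hcur hi; simp at hi
  | cons c cs ih =>
    intro locs cur i hm hcur hi
    cases i with
    | zero =>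
      simp only [visitList, List.getD_cons_zero]
      rw [Nat.add_zero, Nat.mod_eq_of_lt hcur, specC_zero]
    | succ i =>
      simp only [visitList, List.getD_cons_succ]
      rw [ih (locs.set cur _) ((cur + 1) % locs.length) i
        (by simpa using hm) (by simpa using Nat.mod_lt (cur + 1) hm) (by simpa using hi)]
      rw [List.length_set]
      have hidx : ((cur + 1) % locs.length + i) % locs.length = (cur + (i + 1)) % locs.length := by
        rw [Nat.mod_add_mod]
        congr 1
        omega
      rw [hidx]
      have hspec : specC cs locs.length ((cur + 1) % locs.length) i
          = specC cs locs.length (cur + 1) i := by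
        unfold specC
        simp only [Nat.mod_add_mod]
      rw [hspec, specC_shift]
      by_cases C : cur = (cur + (i + 1)) % locs.length
      · rw [if_pos (by rw [Nat.mod_eq_of_lt hcur]; exact C), ← C]
        rw [List.getD_eq_getElem _ _ (by rw [List.length_set]; exact hcur),
            List.getElem_set_self,
            List.getD_eq_getElem _ _ hcur]
        rw [← add_assoc]
      · rw [if_neg (by rw [Nat.mod_eq_of_lt hcur]; exact C),
            show ((0 : Int), (0 : Int)) = (0 : Int × Int) from rfl, zero_add]
        rw [getD_set_ne _ _ _ _ _ (fun h => C h.symm)]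

lemma filter_mod_eq_progL (m r : Nat) (hm : 0 < m) (hr : r < m) :
    ∀ N : Nat, ∃ c : Nat,
      (List.range N).filter (fun j => j % m = r) = progL r m c ∧
      N ≤ r + m * c ∧ r + m * c < N + m := by
  intro N
  induction N with
  | zero => exact ⟨0, by simp [progL], by omega, by omega⟩
  | succ N ih =>
    obtain ⟨c, hf, h1, h2⟩ := ih
    have hmc : (r + m * c) % m = r := by
      rw [Nat.add_mul_mod_self_left, Nat.mod_eq_of_lt hr]
    have hmul : m * (c + 1) = m * c + m := by ring
    by_cases hN : N % m = r
    · have hdvd : m ∣ (r + m * c) - N :=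
        (Nat.modEq_iff_dvd' h1).mp (show N % m = (r + m * c) % m from hN.trans hmc.symm)
      have heq : r + m * c = N := by
        have hlt : (r + m * c) - N < m := by omega
        have hz := Nat.eq_zero_of_dvd_of_lt hdvd hlt
        omega
      refine ⟨c + 1, ?_, by omega, by omega⟩
      rw [List.range_succ, List.filter_append, hf]
      have hone : (List.filter (fun j => decide (j % m = r)) [N]) = [N] := by simp [hN]
      rw [hone]
      unfold progL
      rw [List.range_succ, List.map_append]
      simp [heq]
    · refine ⟨c, ?_, ?_, by omega⟩
      · rw [List.range_succ, List.filter_append, hf]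
        have hnil : (List.filter (fun j => decide (j % m = r)) [N]) = [] := by simp [hN]
        rw [hnil, List.append_nil]
      · have hne : N ≠ r + m * c := by
          intro he; exact hN (by rw [he, hmc])
        omega

lemma specC_eq_specPos (cs : List Char) (m k : Nat) (hm : 0 < m) :
    specC cs m 0 k = specPos cs m k := by
  unfold specC specPos progSum
  have hfc : List.filter (fun j => decide ((0 + j) % m = (0 + k) % m)) (List.range (k + 1))
      = List.filter (fun j => decide (j % m = k % m)) (List.range (k + 1)) := by
    apply List.filter_congr
    intro x _
    simp
  rw [hfc]
  obtain ⟨c, hf, h1, h2⟩ := filter_mod_eq_progL m (k % m) hm (Nat.mod_lt _ hm) (k + 1)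
  have hk0 : m * (k / m) + k % m = k := Nat.div_add_mod k m
  have hle : k ≤ k % m + m * c := by omega
  have hmod2 : k % m = (k % m + m * c) % m := by
    rw [Nat.add_mul_mod_self_left, Nat.mod_eq_of_lt (Nat.mod_lt _ hm)]
  have hdvd : m ∣ (k % m + m * c) - k := (Nat.modEq_iff_dvd' hle).mp hmod2
  have hpos : 0 < (k % m + m * c) - k := by omega
  have hlem : m ≤ (k % m + m * c) - k := Nat.le_of_dvd hpos hdvd
  have heq : k % m + m * c = k + m := by omega
  have hmc2 : m * c = m * (k / m + 1) := by
    have h3 : m * (k / m + 1) = m * (k / m) + m := by ring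
    omega
  have hc : c = k / m + 1 := Nat.eq_of_mul_eq_mul_left hm hmc2
  rw [hf, hc]

lemma posList_eq (cs : List Char) (m : Nat) (hm : 0 < m) :
    ((PySem.List.pyRange 0 (min (m : Int) (cs.length : Int)) 1).foldl
        (bOuterStep (m : Int) cs) (List.replicate cs.length (0, 0)))
      = visitList (List.replicate m (0, 0)) 0 cs := by
  have hmin : min (m : Int) (cs.length : Int) = ((min m cs.length : Nat) : Int) := by
    rw [Nat.cast_min]
  have hrange : PySem.List.pyRange 0 (min (m : Int) (cs.length : Int)) 1
      = (List.range (min m cs.length)).map (fun k => ((k : Nat) : Int)) := by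
    rw [PySem.List.pyRange_one]
    have htn : ((min (m : Int) (cs.length : Int)) - 0).toNat = min m cs.length := by omega
    rw [htn]
    simp
  obtain ⟨hlen, hget⟩ := outer_spec cs m hm (min m cs.length) le_rfl
  rw [hrange]
  apply List.ext_getElem
  · rw [hlen, length_visitList]
  · intro i h1 h2
    have hi : i < cs.length := by rwa [hlen] at h1
    rw [← List.getD_eq_getElem _ ((0:Int),(0:Int)) h1, ← List.getD_eq_getElem _ ((0:Int),(0:Int)) h2]
    rw [hget i hi, if_pos (by have h1 := Nat.mod_lt i hm; have h2 := Nat.mod_le i m; omega)]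
    rw [visit_getD cs _ 0 i (by simpa using hm) (by simpa using hm)
      (by simpa [length_visitList] using hi)]
    simp only [List.length_replicate, Nat.zero_add]
    rw [List.getD_eq_getElem _ _ (by simpa using Nat.mod_lt i hm), List.getElem_replicate]
    rw [show ((0 : Int), (0 : Int)) = (0 : Int × Int) from rfl, zero_add,
        specC_eq_specPos cs m i hm]

-- ===== VERDICT (by name: the statement is the Claim_ definition above) =====
theorem deliver_presents_spec : Claim_equal_deliver_presents := by
  intro directions nd _ hpre
  unfold Spec_deliver_presents
  rcases hpre with h | h
  · simp only [deliver_presents, deliver_presents_alt, h]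
    simp [PySem.List.pyRange_one_eq_nil (min_le_right nd 0)]
  · have h0 : (0 : Int) ≤ nd := by omega
    have hnd : nd = ((nd.toNat : Nat) : Int) := (Int.toNat_of_nonneg h0).symm
    have hm : 0 < nd.toNat := by omega
    simp only [deliver_presents, deliver_presents_alt]
    rw [hnd, Int.toNat_natCast]
    have hA := foldA_eq directions.toList (PySem.Dict.empty.insert (0, 0) 1)
      (List.replicate nd.toNat ((0 : Int), (0 : Int))) 0 ((nd.toNat : Nat) : Int)
      (by simpa using hm) (by simpa using hm) (by simp)
    rw [Nat.cast_zero] at hA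
    rw [hA, posList_eq directions.toList nd.toNat hm]
    rfl
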